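-- pv_equiv track=rewrite | github.com/Alvin2580du/alvin_py | project_1028/1109502_500/haar.py | Haar
-- ===== SOURCE A (Python) =====
-- def Haar(interM, weigth, height, size=1, deep=2):
--     # 计算Haar特征
--     dst = []
--     for i in range(height - deep + 1):
--         dst.append([0 for x in range(weigth - size)])
--         for j in range(weigth - 2 * size + 1):
--             if j == 0 and i == 0:
--                 whithe = int(interM[i + deep - 1][j + size - 1])
--             elif i != 0 and j == 0:
--                 whithe = int(interM[i + deep - 1][j + size - 1]) - int(interM[i - 1][j + size - 1])
--             elif i == 0 and j != 0:
--                 whithe = int(interM[i + deep - 1][j + size - 1]) - int(interM[i + 1][j - 1])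
--             else:
--                 whithe = int(interM[i + deep - 1][j + size - 1]) + int(interM[i - 1][j - 1]) - int(
--                     interM[i + 1][j - 1]) - int(interM[i - 1][j + size - 1])
--             _i = i
--             _j = j + size
--             if _i == 0:
--                 black = int(interM[_i + deep - 1][_j + size - 1]) - int(interM[_i + 1][_j - 1])
--             else:
--                 black = int(interM[_i + deep - 1][_j + size - 1]) + int(interM[_i - 1][_j - 1]) - int(
--                     interM[_i + 1][_j - 1]) - int(interM[_i - 1][_j + size - 1])
--             dst[i][j] = black - whithe
--     return dst
-- ===== SOURCE B (Python) =====
-- def Haar(interM, weigth, height, size=1, deep=2):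
--     # Two-stage: per row, first tabulate all vertical window sums once, then each
--     # feature is a lag-`size` difference of that table (black window minus white window).
--     def corner(r, c):
--         return int(interM[r][c]) if r >= 0 and c >= 0 else 0
--
--     def window_sums(i):
--         return [corner(i + deep - 1, j + size - 1) - corner(i - 1, j + size - 1)
--                 - corner(i + 1, j - 1) + corner(i - 1, j - 1)
--                 for j in range(weigth - size + 1)]
--
--     cols = weigth - 2 * size + 1
--     dst = []
--     for i in range(height - deep + 1):
--         if cols > 0:
--             w = window_sums(i)
--             dst.append([w[j + size] - w[j] for j in range(cols)] + [0] * (size - 1))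
--         else:
--             dst.append([0] * (weigth - size))
--     return dst
-- ===== Notes on version B (the rewrite author's own statement) =====
-- stated objective: alternative
-- what changed: B computes each output row in two stages - one pass tabulating the vertical window sums of the row band, then a pass taking lag-size differences of that table - instead of A's per-cell six-way branch ladder that recomputes both windows from scratch for every cell; Pre_ excludes non-positive size/deep calls whose loops execute (A then relies on negative-index wraparound or raises) and matrices too small/ragged for A's accesses.
import Mathlib
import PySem

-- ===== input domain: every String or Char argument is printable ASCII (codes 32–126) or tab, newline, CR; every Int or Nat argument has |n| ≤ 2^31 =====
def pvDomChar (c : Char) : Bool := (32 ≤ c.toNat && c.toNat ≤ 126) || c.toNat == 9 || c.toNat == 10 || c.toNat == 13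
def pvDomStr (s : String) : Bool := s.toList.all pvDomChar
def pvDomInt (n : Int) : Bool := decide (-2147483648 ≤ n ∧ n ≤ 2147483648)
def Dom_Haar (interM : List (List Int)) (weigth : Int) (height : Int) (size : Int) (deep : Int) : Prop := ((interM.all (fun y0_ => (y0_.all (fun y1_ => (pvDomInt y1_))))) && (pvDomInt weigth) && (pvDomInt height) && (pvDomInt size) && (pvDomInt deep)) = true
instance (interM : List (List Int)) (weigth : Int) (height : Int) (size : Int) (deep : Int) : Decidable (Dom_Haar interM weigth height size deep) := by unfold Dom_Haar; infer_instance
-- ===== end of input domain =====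

-- B computes each row in two stages — tabulate the vertical window sums once, then take
-- lag-size differences of that table — instead of A's per-cell branch ladder; objective: alternative.

-- ===== PORT A =====
-- interM[r][c]: exact wherever the indices are in range (all of Pre_); 0 where Python raises IndexError
def pvAGet (m : List (List Int)) (r c : Int) : Int :=
  PySem.List.pyGetD (PySem.List.pyGetD m r []) c 0

-- the body of A's inner loop: whithe / black branch ladder, result black - whithe
def pvABody (interM : List (List Int)) (size deep i j : Int) : Int :=
  let whithe : Int :=
    if i = 0 ∧ j = 0 then
      pvAGet interM (i + deep - 1) (j + size - 1)
    else if i ≠ 0 ∧ j = 0 then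
      pvAGet interM (i + deep - 1) (j + size - 1) - pvAGet interM (i - 1) (j + size - 1)
    else if i = 0 ∧ j ≠ 0 then
      pvAGet interM (i + deep - 1) (j + size - 1) - pvAGet interM (i + 1) (j - 1)
    else
      pvAGet interM (i + deep - 1) (j + size - 1) + pvAGet interM (i - 1) (j - 1)
        - pvAGet interM (i + 1) (j - 1) - pvAGet interM (i - 1) (j + size - 1)
  let i2 := i
  let j2 := j + size
  let black : Int :=
    if i2 = 0 then
      pvAGet interM (i2 + deep - 1) (j2 + size - 1) - pvAGet interM (i2 + 1) (j2 - 1)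
    else
      pvAGet interM (i2 + deep - 1) (j2 + size - 1) + pvAGet interM (i2 - 1) (j2 - 1)
        - pvAGet interM (i2 + 1) (j2 - 1) - pvAGet interM (i2 - 1) (j2 + size - 1)
  black - whithe

-- one iteration of A's outer loop: append the zero row, then mutate dst[i][j] in the j loop
def pvARow (interM : List (List Int)) (weigth size deep i : Int) : List Int :=
  let row0 : List Int := (PySem.List.pyRange 0 (weigth - size) 1).map (fun _ => (0 : Int))
  (PySem.List.pyRange 0 (weigth - 2 * size + 1) 1).foldl
    (fun row j => PySem.List.pySetD row j (pvABody interM size deep i j)) row0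

def Haar (interM : List (List Int)) (weigth : Int) (height : Int) (size : Int) (deep : Int) : List (List Int) :=
  (PySem.List.pyRange 0 (height - deep + 1) 1).foldl
    (fun dst i => dst ++ [pvARow interM weigth size deep i]) []

-- ===== PORT B =====
-- corner(r, c): int(interM[r][c]) if r >= 0 and c >= 0 else 0
def pvCorner (m : List (List Int)) (r c : Int) : Int :=
  if 0 ≤ r ∧ 0 ≤ c then PySem.List.pyGetD (PySem.List.pyGetD m r []) c 0 else 0

-- the comprehension body of window_sums
def pvWin (m : List (List Int)) (size deep i j : Int) : Int :=
  pvCorner m (i + deep - 1) (j + size - 1) - pvCorner m (i - 1) (j + size - 1)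
    - pvCorner m (i + 1) (j - 1) + pvCorner m (i - 1) (j - 1)

-- window_sums(i)
def pvWindowSums (m : List (List Int)) (weigth size deep i : Int) : List Int :=
  (PySem.List.pyRange 0 (weigth - size + 1) 1).map (fun j => pvWin m size deep i j)

-- one appended row of B
def pvBRow (m : List (List Int)) (weigth size deep i : Int) : List Int :=
  if 0 < weigth - 2 * size + 1 then
    let w := pvWindowSums m weigth size deep i
    ((PySem.List.pyRange 0 (weigth - 2 * size + 1) 1).map
        (fun j => PySem.List.pyGetD w (j + size) 0 - PySem.List.pyGetD w j 0))
      ++ List.replicate (size - 1).toNat 0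
  else List.replicate (weigth - size).toNat 0

def Haar_alt (interM : List (List Int)) (weigth : Int) (height : Int) (size : Int) (deep : Int) : List (List Int) :=
  (PySem.List.pyRange 0 (height - deep + 1) 1).foldl
    (fun dst i => dst ++ [pvBRow interM weigth size deep i]) []

-- ===== PRECONDITION & SPEC =====
-- Pre_ excludes (a) calls with non-positive size or deep whose loops execute — there A's
-- indexing relies on Python negative-index wraparound (non-positive window dimensions are
-- outside the task's natural domain), and (b) matrices too small or too ragged for A's
-- accesses; the row-width condition on the first height and height-deep+2 rows is
-- slightly stronger than A's exact access pattern (e.g. row 0 is unread when deep ≥ 2 and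
-- height = deep), so a few ragged inputs A handles are excluded although B matches A there.
def Pre_Haar (interM : List (List Int)) (weigth : Int) (height : Int) (size : Int) (deep : Int) : Prop :=
  height - deep + 1 ≤ 0 ∨ weigth - 2 * size + 1 ≤ 0 ∨
    (1 ≤ size ∧ 1 ≤ deep ∧ height ≤ (interM.length : Int) ∧
      height - deep + 2 ≤ (interM.length : Int) ∧
      (∀ row ∈ interM.take height.toNat, weigth ≤ (row.length : Int)) ∧
      ∀ row ∈ interM.take (height - deep + 2).toNat, weigth ≤ (row.length : Int))
instance (interM : List (List Int)) (weigth : Int) (height : Int) (size : Int) (deep : Int) : Decidable (Pre_Haar interM weigth height size deep) := by unfold Pre_Haar; infer_instance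

def pvWitness_Haar : List (List Int) × Int × Int × Int × Int := ([[1, 2], [3, 4]], 2, 2, 1, 2)

def Spec_Haar (interM : List (List Int)) (weigth : Int) (height : Int) (size : Int) (deep : Int) (out : List (List Int)) : Prop := out = Haar_alt interM weigth height size deep
instance (interM : List (List Int)) (weigth : Int) (height : Int) (size : Int) (deep : Int) (out : List (List Int)) : Decidable (Spec_Haar interM weigth height size deep out) := by unfold Spec_Haar; infer_instance

-- ===== CLAIM (what is proved, stated in full; the proofs are below) =====
def Claim_equal_Haar : Prop := ∀ (interM : List (List Int)) (weigth : Int) (height : Int) (size : Int) (deep : Int), Dom_Haar interM weigth height size deep → Pre_Haar interM weigth height size deep → Spec_Haar interM weigth height size deep (Haar interM weigth height size deep)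

-- ===== LEMMAS AND PROOFS =====

-- A's loop body is the lag-size difference of B's window sums (interior indices, positive window)
lemma pvBody_eq_win (m : List (List Int)) (s d i j : Int)
    (hi : 0 ≤ i) (hj : 0 ≤ j) (hs : 1 ≤ s) (hd : 1 ≤ d) :
    pvABody m s d i j = pvWin m s d i (j + s) - pvWin m s d i j := by
  have hA : ∀ r c : Int, 0 ≤ r → 0 ≤ c → pvCorner m r c = pvAGet m r c :=
    fun r c h1 h2 => if_pos ⟨h1, h2⟩
  have hN : ∀ r c : Int, r < 0 ∨ c < 0 → pvCorner m r c = 0 :=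
    fun r c h => if_neg (by omega)
  unfold pvABody pvWin
  by_cases hi0 : i = 0 <;> by_cases hj0 : j = 0 <;> dsimp only
  · -- i = 0, j = 0
    rw [if_pos (⟨hi0, hj0⟩ : i = 0 ∧ j = 0), if_pos hi0,
      hA (i + d - 1) (j + s + s - 1) (by omega) (by omega),
      hA (i + 1) (j + s - 1) (by omega) (by omega),
      hA (i + d - 1) (j + s - 1) (by omega) (by omega),
      hN (i - 1) (j + s + s - 1) (by omega),
      hN (i - 1) (j + s - 1) (by omega),
      hN (i + 1) (j - 1) (by omega),
      hN (i - 1) (j - 1) (by omega)]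
    ring
  · -- i = 0, j ≠ 0
    rw [if_neg (by omega : ¬(i = 0 ∧ j = 0)), if_neg (by omega : ¬(i ≠ 0 ∧ j = 0)),
      if_pos (⟨hi0, hj0⟩ : i = 0 ∧ j ≠ 0), if_pos hi0,
      hA (i + d - 1) (j + s + s - 1) (by omega) (by omega),
      hA (i + 1) (j + s - 1) (by omega) (by omega),
      hA (i + d - 1) (j + s - 1) (by omega) (by omega),
      hA (i + 1) (j - 1) (by omega) (by omega),
      hN (i - 1) (j + s + s - 1) (by omega),
      hN (i - 1) (j + s - 1) (by omega),
      hN (i - 1) (j - 1) (by omega)]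
    ring
  · -- i ≠ 0, j = 0
    rw [if_neg (by omega : ¬(i = 0 ∧ j = 0)), if_pos (⟨hi0, hj0⟩ : i ≠ 0 ∧ j = 0),
      if_neg hi0,
      hA (i + d - 1) (j + s + s - 1) (by omega) (by omega),
      hA (i - 1) (j + s + s - 1) (by omega) (by omega),
      hA (i + 1) (j + s - 1) (by omega) (by omega),
      hA (i - 1) (j + s - 1) (by omega) (by omega),
      hA (i + d - 1) (j + s - 1) (by omega) (by omega),
      hN (i + 1) (j - 1) (by omega),
      hN (i - 1) (j - 1) (by omega)]
    ring
  · -- i ≠ 0, j ≠ 0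
    rw [if_neg (by omega : ¬(i = 0 ∧ j = 0)), if_neg (by omega : ¬(i ≠ 0 ∧ j = 0)),
      if_neg (by omega : ¬(i = 0 ∧ j ≠ 0)), if_neg hi0,
      hA (i + d - 1) (j + s + s - 1) (by omega) (by omega),
      hA (i - 1) (j + s + s - 1) (by omega) (by omega),
      hA (i + 1) (j + s - 1) (by omega) (by omega),
      hA (i - 1) (j + s - 1) (by omega) (by omega),
      hA (i + d - 1) (j + s - 1) (by omega) (by omega),
      hA (i + 1) (j - 1) (by omega) (by omega),
      hA (i - 1) (j - 1) (by omega) (by omega)]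
    ring

-- folding row[k] := g k over range m replaces the first m entries
lemma foldl_set_range (g : Nat → Int) :
    ∀ (m : Nat) (row : List Int), m ≤ row.length →
      (List.range m).foldl (fun r k => r.set k (g k)) row
        = (List.range m).map (fun k => g k) ++ row.drop m := by
  intro m
  induction m with
  | zero => intro row _; simp
  | succ n ih =>
    intro row hlen
    rw [List.range_succ, List.foldl_append, List.foldl_cons, List.foldl_nil,
      ih row (by omega)]
    rw [List.drop_eq_getElem_cons (show n < row.length by omega)]
    simp
    rw [List.drop_eq_getElem_cons (show n < row.length by omega)]
    rfl

-- inner loop empty: A's row stays the zero row, B appends the all-zero row directly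
lemma row_eq_empty (m : List (List Int)) (w s d i : Int) (h2 : w - 2 * s + 1 ≤ 0) :
    pvARow m w s d i = pvBRow m w s d i := by
  unfold pvARow pvBRow
  rw [PySem.List.pyRange_one_eq_nil (by omega : w - 2 * s + 1 ≤ 0), if_neg (by omega)]
  simp only [List.foldl_nil]
  rw [PySem.List.pyRange_one 0 (w - s), List.map_map]
  simp only [Function.comp_def]
  rw [List.map_const']
  simp

-- inner loop nonempty: the fold of assignments equals B's difference-of-window-sums row
lemma row_eq_full (m : List (List Int)) (w s d i : Int)
    (hi : 0 ≤ i) (hs : 1 ≤ s) (hd : 1 ≤ d) :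
    pvARow m w s d i = pvBRow m w s d i := by
  by_cases h2 : w - 2 * s + 1 ≤ 0
  · exact row_eq_empty m w s d i h2
  unfold pvARow pvBRow
  rw [if_pos (by omega)]
  rw [PySem.List.pyRange_one (0 : Int) (w - 2 * s + 1),
      PySem.List.pyRange_one (0 : Int) (w - s)]
  simp only [List.foldl_map, List.map_map, zero_add, sub_zero, Function.comp_def,
    PySem.List.pySetD_natCast]
  rw [foldl_set_range (fun k => pvABody m s d i (k : Int)) _ _
        (by simp; omega)]
  apply List.ext_getElem
  · simp [pvWindowSums]; omega
  · intro n h1 h2'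
    by_cases hn : n < (w - 2 * s + 1).toNat
    · rw [List.getElem_append_left (by simpa using hn),
          List.getElem_append_left (by simpa using hn)]
      simp only [List.getElem_map, List.getElem_range]
      unfold pvWindowSums
      rw [PySem.List.pyGetD_map_pyRange_of_nonneg (fun j => pvWin m s d i j) (w - s + 1)
            ((n : Int) + s) 0 (by omega) (by omega),
          PySem.List.pyGetD_map_pyRange_of_nonneg (fun j => pvWin m s d i j) (w - s + 1)
            (n : Int) 0 (by omega) (by omega)]
      exact pvBody_eq_win m s d i (n : Int) hi (by omega) hs hd
    · rw [List.getElem_append_right (by simpa using hn),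
          List.getElem_append_right (by simpa using hn)]
      simp only [List.getElem_map, List.getElem_drop,
        List.getElem_replicate]

-- ===== VERDICT (by name: the statement is the Claim_ definition above) =====
theorem Haar_spec : Claim_equal_Haar := by
  intro M w h s d hdom hpre
  unfold Spec_Haar Haar Haar_alt
  rw [PySem.List.foldl_append_singleton_eq_map, PySem.List.foldl_append_singleton_eq_map]
  refine List.map_congr_left ?_
  intro i hi
  have hi0 : 0 ≤ i := (PySem.List.mem_pyRange_one.1 hi).1
  rcases hpre with h1 | h2 | ⟨hs, hd, _, _, _, _⟩
  · rw [PySem.List.pyRange_one_eq_nil (by omega : h - d + 1 ≤ 0)] at hi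
    simp at hi
  · exact row_eq_empty M w s d i h2
  · exact row_eq_full M w s d i hi0 hs hd
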